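-- pv_equiv track=rewrite | github.com/yang11241/study | programmers_coding_tests/숫자게임.py | solution
-- ===== SOURCE A (Python) =====
-- def solution(A, B):
--     A.sort()
--     B.sort()
--
--     rs_list = []
--     for i in B:
--         # A > B를 만족하는 A의 원소들을 임시리스트에 담고
--         tmp_list = []
--         for j in A:
--             if i > j:
--                 tmp_list.append(j)
--                 break;
--         if tmp_list:
--             # 임시리스트가 값을 들고있으면 최솟값을 A에서 제거해주기
--             A.remove(min(tmp_list))
--
--         # rs_list에 담아주기 즉, rs_list는 B의 각 index에 위치한 사람이 이길수 있는 경우의 수를 나타냄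
--         rs_list.append(tmp_list)
--
--     return len([1 for i in rs_list if i])  # rs_list의 각 원소가 존재하면 B가 이길수 있는 애들
-- ===== SOURCE B (Python) =====
-- def solution(A, B):
--     a = sorted(A)
--     b = sorted(B)
--     i = 0
--     wins = 0
--     for x in b:
--         if i < len(a) and x > a[i]:
--             wins += 1
--             i += 1
--     return wins
-- ===== Notes on version B (the rewrite author's own statement) =====
-- stated objective: faster
-- what changed: Replaced the per-element inner scan of A, the singleton tmp_list bookkeeping and the O(n) list.remove with a single two-pointer pass over the two sorted lists.
import Mathlib
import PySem

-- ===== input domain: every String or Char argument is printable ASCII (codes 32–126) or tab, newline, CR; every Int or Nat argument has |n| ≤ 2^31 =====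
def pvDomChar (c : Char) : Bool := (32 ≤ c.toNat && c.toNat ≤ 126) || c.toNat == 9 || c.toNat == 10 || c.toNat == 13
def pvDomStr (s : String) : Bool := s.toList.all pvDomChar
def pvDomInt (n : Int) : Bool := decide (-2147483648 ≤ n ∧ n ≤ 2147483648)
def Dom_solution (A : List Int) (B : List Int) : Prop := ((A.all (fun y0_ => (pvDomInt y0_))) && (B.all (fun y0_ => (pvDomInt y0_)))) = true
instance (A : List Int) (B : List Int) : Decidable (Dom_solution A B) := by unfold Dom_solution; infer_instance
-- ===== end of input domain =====

-- B replaces A's inner scan / tmp_list / list.remove loop by a two-pointer pass over the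
-- two sorted lists (faster). A sorts its arguments in place and removes from A; B does not
-- mutate its arguments — the equivalence proved here is about the return value only.

-- ===== PORT A =====

-- inner 'for j in A: if i > j: tmp_list.append(j); break'
def pvTmpList (i : Int) : List Int → List Int
  | [] => []
  | j :: rest => if i > j then [j] else pvTmpList i rest

-- 'if tmp_list: A.remove(min(tmp_list))'
def pvStep (A : List Int) (tmp : List Int) : List Int :=
  if tmp.isEmpty then A
  else
    match PySem.List.min? tmp (fun x => x) with
    | some m => (PySem.List.remove? A m).getD A   -- min(tmp_list) ∈ A, so remove? succeeds
    | none => A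

-- 'for i in B:' loop carrying the mutable list A, producing rs_list
def pvLoopA (A : List Int) : List Int → List (List Int)
  | [] => []
  | i :: rest => pvTmpList i A :: pvLoopA (pvStep A (pvTmpList i A)) rest

def solution (A : List Int) (B : List Int) : Int :=
  let As := PySem.List.sorted A (fun x => x) false
  let Bs := PySem.List.sorted B (fun x => x) false
  let rs := pvLoopA As Bs
  -- len([1 for i in rs_list if i])
  ((rs.filter (fun l => !l.isEmpty)).length : Int)

-- ===== PORT B =====

-- 'for x in b:' with index i into a and a win counter
def pvLoopB (a : List Int) : List Int → Nat → Int → Int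
  | [], _, wins => wins
  | x :: rest, i, wins =>
      if i < a.length ∧ x > a.getD i 0 then pvLoopB a rest (i + 1) (wins + 1)
      else pvLoopB a rest i wins

def solution_alt (A : List Int) (B : List Int) : Int :=
  let a := PySem.List.sorted A (fun x => x) false
  let b := PySem.List.sorted B (fun x => x) false
  pvLoopB a b 0 0

-- ===== PRECONDITION & SPEC =====
def Spec_solution (A : List Int) (B : List Int) (out : Int) : Prop := out = solution_alt A B
instance (A : List Int) (B : List Int) (out : Int) : Decidable (Spec_solution A B out) := by unfold Spec_solution; infer_instance

-- ===== CLAIM (what is proved, stated in full; the proofs are below) =====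
def Claim_equal_solution : Prop := ∀ (A : List Int) (B : List Int), Dom_solution A B → Spec_solution A B (solution A B)

-- ===== LEMMAS AND PROOFS =====

theorem pvTmpList_eq_nil (i : Int) (l : List Int) (h : ∀ j ∈ l, ¬ i > j) :
    pvTmpList i l = [] := by
  induction l with
  | nil => rfl
  | cons j rest ih =>
    simp only [pvTmpList, if_neg (h j List.mem_cons_self)]
    exact ih (fun y hy => h y (List.mem_cons_of_mem _ hy))

theorem pvStep_nil (A : List Int) : pvStep A [] = A := rfl

theorem pvStep_singleton_cons (v : Int) (t : List Int) :
    pvStep (v :: t) [v] = t := by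
  have hmin : PySem.List.min? [v] (fun x => x) = some v := rfl
  simp [pvStep, hmin, PySem.List.remove?_cons_self]

-- count of non-empty entries of rs_list, as produced by pvLoopA
def pvCount (rs : List (List Int)) : Int := ((rs.filter (fun l => !l.isEmpty)).length : Int)

theorem pvCount_cons (t : List Int) (rs : List (List Int)) :
    pvCount (t :: rs) = (if t.isEmpty then 0 else 1) + pvCount rs := by
  by_cases h : t.isEmpty <;> simp [pvCount, h] <;> ring

theorem pvLoopB_add (a bs : List Int) (i : Nat) (w : Int) :
    pvLoopB a bs i w = w + pvLoopB a bs i 0 := by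
  induction bs generalizing i w with
  | nil => simp [pvLoopB]
  | cons x rest ih =>
    simp only [pvLoopB]
    split_ifs with h
    · rw [ih (i+1) (w+1), ih (i+1) (0+1)]; ring
    · exact ih i w

-- Main invariant: A's loop on the suffix a.drop i computes what B's loop computes from index i.
theorem pv_main (a : List Int) (hs : a.Pairwise (· ≤ ·)) :
    ∀ (bs : List Int) (i : Nat),
      pvCount (pvLoopA (a.drop i) bs) = pvLoopB a bs i 0 := by
  intro bs
  induction bs with
  | nil => intro i; simp [pvLoopA, pvLoopB, pvCount]
  | cons x rest ih =>
    intro i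
    have hdrop : (a.drop i).Pairwise (· ≤ ·) := List.Pairwise.drop hs
    by_cases hi : i < a.length
    · have hconsd : a.drop i = a[i] :: a.drop (i + 1) := List.drop_eq_getElem_cons hi
      have hgetD : a.getD i 0 = a[i] := by
        simp [List.getD, List.getElem?_eq_getElem hi]
      by_cases hx : x > a[i]
      · -- win: tmp = [a[i]], the removal strips the head, the pointer advances
        have htmp : pvTmpList x (a.drop i) = [a[i]] := by
          rw [hconsd]; simp [pvTmpList, hx]
        have hstep : pvStep (a.drop i) [a[i]] = a.drop (i + 1) := by
          rw [hconsd]; exact pvStep_singleton_cons _ _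
        simp only [pvLoopA, htmp, hstep]
        rw [pvCount_cons, ih (i + 1)]
        simp only [pvLoopB, hgetD, if_pos (And.intro hi hx)]
        rw [pvLoopB_add a rest (i+1) (0+1)]
        simp
      · -- no win: tmp = [], A unchanged
        have hle : ∀ j ∈ a.drop i, ¬ x > j := by
          intro j hj
          rw [hconsd] at hj
          rcases List.mem_cons.mp hj with h | h
          · subst h; exact hx
          · have hpw := hdrop
            rw [hconsd] at hpw
            have := (List.pairwise_cons.mp hpw).1 j h
            omega
        have htmp : pvTmpList x (a.drop i) = [] := pvTmpList_eq_nil x _ hle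
        have hc : ¬ (i < a.length ∧ x > a.getD i 0) := by
          rw [hgetD]; exact fun h => hx h.2
        simp only [pvLoopA, htmp, pvStep_nil]
        rw [pvCount_cons, ih i]
        simp only [pvLoopB, if_neg hc]
        simp
    · -- i ≥ len a: the suffix is empty, tmp = []
      have hnil : a.drop i = [] := List.drop_eq_nil_of_le (by omega)
      have htmp : pvTmpList x (a.drop i) = [] := by rw [hnil]; rfl
      simp only [pvLoopA, htmp, pvStep_nil]
      rw [pvCount_cons, ih i]
      simp [pvLoopB, hi]

-- ===== VERDICT (by name: the statement is the Claim_ definition above) =====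
theorem solution_spec : Claim_equal_solution := by
  intro A B _
  unfold Spec_solution solution solution_alt
  have hs : (PySem.List.sorted A (fun x => x) false).Pairwise (· ≤ ·) := by
    simpa using PySem.List.sorted_pairwise (xs := A) (key := fun x => x)
  have := pv_main (PySem.List.sorted A (fun x => x) false) hs
    (PySem.List.sorted B (fun x => x) false) 0
  simpa [pvCount] using this
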